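-- pv_equiv track=rewrite | github.com/anitoanto/gitdirector | src/gitdirector/integrations/tmux.py | _distribute_proportional
-- ===== SOURCE A (Python) =====
-- def _distribute_equal(total: int, parts: int) -> list[int]:
--     base = total // parts
--     remainder = total % parts
--     return [base + (1 if i < remainder else 0) for i in range(parts)]
--
-- def _distribute_proportional(total: int, parts: int, ratios: tuple[int, ...] | None) -> list[int]:
--     if not ratios or len(ratios) != parts:
--         return _distribute_equal(total, parts)
--     total_ratio = sum(ratios)
--     if total_ratio == 0:
--         return _distribute_equal(total, parts)
--
--     sizes = [(total * r) // total_ratio for r in ratios]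
--     rem = total - sum(sizes)
--
--     indices = sorted(range(parts), key=lambda i: ratios[i], reverse=True)
--     for i in range(rem):
--         sizes[indices[i % parts]] += 1
--     return sizes
-- ===== SOURCE B (Python) =====
-- def _distribute_proportional(total: int, parts: int, ratios) -> list[int]:
--     if not ratios or len(ratios) != parts or sum(ratios) == 0:
--         q = total // parts
--         r = total - q * parts
--         return [q + 1] * r + [q] * (parts - r)
--     T = sum(ratios)
--     sizes = [total * r // T for r in ratios]
--     rem = total - sum(sizes)
--     out = []
--     for i, x in enumerate(ratios):
--         rank = sum(1 for j, y in enumerate(ratios) if y > x or (y == x and j < i))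
--         out.append(sizes[i] + (1 if rank < rem else 0))
--     return out
-- ===== Notes on version B (the rewrite author's own statement) =====
-- stated objective: alternative
-- what changed: The stable descending index sort plus the in-place increment loop over its first rem entries is replaced by a per-index rank count (how many indices precede it in ratio-desc/index-asc order) deciding each +1 in a single output-building pass, and the equal-split fallback is built by list replication instead of a range comprehension.
import Mathlib
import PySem

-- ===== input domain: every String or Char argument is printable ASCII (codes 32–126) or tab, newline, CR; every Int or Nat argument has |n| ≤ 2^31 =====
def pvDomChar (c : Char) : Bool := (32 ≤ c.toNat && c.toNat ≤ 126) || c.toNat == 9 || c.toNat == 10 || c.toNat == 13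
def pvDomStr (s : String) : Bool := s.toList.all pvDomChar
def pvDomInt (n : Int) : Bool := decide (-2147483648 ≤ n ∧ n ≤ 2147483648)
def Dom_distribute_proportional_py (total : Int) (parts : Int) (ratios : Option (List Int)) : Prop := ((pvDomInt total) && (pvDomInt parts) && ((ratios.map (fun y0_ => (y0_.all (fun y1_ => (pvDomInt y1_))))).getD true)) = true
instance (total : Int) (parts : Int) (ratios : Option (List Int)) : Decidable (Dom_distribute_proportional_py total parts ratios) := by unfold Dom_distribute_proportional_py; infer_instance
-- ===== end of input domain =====

-- B replaces the stable descending sort of all indices (plus the increment loop over the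
-- first `rem` of them) by a per-index rank count — no sort, no in-place updates: each entry
-- gets its +1 iff fewer than `rem` indices precede it in (ratio desc, index asc) order —
-- and builds the equal-split fallback by list replication instead of a range comprehension.

-- ===== PORT A =====
def distribute_equal_py (total : Int) (parts : Int) : List Int :=
  let base := PySem.Int.floordiv total parts
  let remainder := PySem.Int.mod total parts
  (PySem.List.pyRange 0 parts).map (fun i => base + (if i < remainder then (1 : Int) else 0))

def distribute_proportional_py (total : Int) (parts : Int) (ratios : Option (List Int)) : List Int :=
  match ratios with
  | none => distribute_equal_py total parts
  | some rs =>
    if rs = [] ∨ PySem.List.len rs ≠ parts then distribute_equal_py total parts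
    else
      let total_ratio := rs.sum
      if total_ratio = 0 then distribute_equal_py total parts
      else
        let sizes := rs.map (fun r => PySem.Int.floordiv (total * r) total_ratio)
        let rem := total - sizes.sum
        let indices := PySem.List.sorted (PySem.List.pyRange 0 parts)
          (fun i => PySem.List.pyGetD rs i 0) true
        (PySem.List.pyRange 0 rem).foldl
          (fun acc i =>
            let idx := PySem.List.pyGetD indices (PySem.Int.mod i parts) 0
            PySem.List.pySetD acc idx (PySem.List.pyGetD acc idx 0 + 1))
          sizes

-- ===== PORT B =====
def distribute_proportional_py_alt (total : Int) (parts : Int) (ratios : Option (List Int)) : List Int :=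
  let rs := ratios.getD []
  if rs = [] ∨ PySem.List.len rs ≠ parts ∨ rs.sum = 0 then
    let q := PySem.Int.floordiv total parts
    let r := total - q * parts
    List.replicate r.toNat (q + 1) ++ List.replicate (parts - r).toNat q
  else
    let T := rs.sum
    let sizes := rs.map (fun r => PySem.Int.floordiv (total * r) T)
    let rem := total - sizes.sum
    (PySem.List.enumerate rs).foldl
      (fun out p =>
        let rank := (PySem.List.enumerate rs).foldl
          (fun acc q => if q.2 > p.2 ∨ (q.2 = p.2 ∧ q.1 < p.1) then acc + 1 else acc) (0 : Int)
        out ++ [PySem.List.pyGetD sizes p.1 0 + (if rank < rem then (1 : Int) else 0)]) []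

-- ===== PRECONDITION & SPEC =====
-- Pre_ excludes exactly parts = 0, where A raises ZeroDivisionError (and B raises too).
def Pre_distribute_proportional_py (total : Int) (parts : Int) (ratios : Option (List Int)) : Prop :=
  parts ≠ 0
instance (total : Int) (parts : Int) (ratios : Option (List Int)) : Decidable (Pre_distribute_proportional_py total parts ratios) := by unfold Pre_distribute_proportional_py; infer_instance

def pvWitness_distribute_proportional_py : Int × Int × Option (List Int) := (5, 2, some [1, 2])

def Spec_distribute_proportional_py (total : Int) (parts : Int) (ratios : Option (List Int)) (out : List Int) : Prop := out = distribute_proportional_py_alt total parts ratios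
instance (total : Int) (parts : Int) (ratios : Option (List Int)) (out : List Int) : Decidable (Spec_distribute_proportional_py total parts ratios out) := by unfold Spec_distribute_proportional_py; infer_instance

-- ===== CLAIM (what is proved, stated in full; the proofs are below) =====
def Claim_equal_distribute_proportional_py : Prop := ∀ (total : Int) (parts : Int) (ratios : Option (List Int)), Dom_distribute_proportional_py total parts ratios → Pre_distribute_proportional_py total parts ratios → Spec_distribute_proportional_py total parts ratios (distribute_proportional_py total parts ratios)

-- ===== LEMMAS AND PROOFS =====

-- strict "comes earlier in the stable descending order" test on ratio indices
def pvPrec (rs : List Int) (a b : Int) : Bool :=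
  decide (PySem.List.pyGetD rs b 0 < PySem.List.pyGetD rs a 0) ||
    (decide (PySem.List.pyGetD rs a 0 = PySem.List.pyGetD rs b 0) && decide (a < b))

theorem pvPrec_iff (rs : List Int) (a b : Int) : pvPrec rs a b = true ↔
    (PySem.List.pyGetD rs b 0 < PySem.List.pyGetD rs a 0 ∨
      (PySem.List.pyGetD rs a 0 = PySem.List.pyGetD rs b 0 ∧ a < b)) := by
  simp [pvPrec]

theorem pvPrec_asymm (rs : List Int) (a b : Int) :
    pvPrec rs a b = true → ¬ pvPrec rs b a = true := by
  simp only [pvPrec_iff]; omega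

theorem pvPrec_irrefl (rs : List Int) (a : Int) : ¬ pvPrec rs a a = true := by
  simp only [pvPrec_iff]; omega

-- inserting x into a pvPrec-sorted list keeps it sorted, provided every resident compares
-- against x consistently with the insertion test and the test is monotone along the list
theorem insertBy_pairwise {α : Type} (before : α → α → Bool) (R : α → α → Prop) (x : α)
    (acc : List α) (hacc : acc.Pairwise R)
    (h : ∀ y ∈ acc, (before x y = true ∧ R x y) ∨ (before x y = false ∧ R y x))
    (hmono : ∀ y z, R y z → before x y = true → before x z = true) :
    (PySem.List.insertBy before x acc).Pairwise R := by
  induction acc with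
  | nil => simp [PySem.List.insertBy]
  | cons y ys ih =>
    rcases List.pairwise_cons.mp hacc with ⟨hy, hys⟩
    by_cases hb : before x y = true
    · simp only [PySem.List.insertBy, hb, if_true]
      refine List.pairwise_cons.mpr ⟨?_, List.pairwise_cons.mpr ⟨hy, hys⟩⟩
      intro z hz
      rcases List.mem_cons.mp hz with rfl | hz'
      · rcases h z (by simp) with ⟨_, hR⟩ | ⟨hf, _⟩
        · exact hR
        · simp [hb] at hf
      · rcases h z (List.mem_cons_of_mem _ hz') with ⟨_, hR⟩ | ⟨hf, _⟩
        · exact hR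
        · exact absurd (hmono y z (hy z hz') hb) (by simp [hf])
    · simp only [PySem.List.insertBy, hb, if_false]
      refine List.pairwise_cons.mpr ⟨?_, ih hys (fun z hz => h z (List.mem_cons_of_mem _ hz))⟩
      intro z hz
      rcases (PySem.List.mem_insertBy before x z ys).mp hz with rfl | hz'
      · rcases h y List.mem_cons_self with ⟨ht, _⟩ | ⟨_, hR⟩
        · exact absurd ht (by simpa using hb)
        · exact hR
      · exact hy z hz'

-- the stable descending index sort is pvPrec-sorted, and its members are exactly 0..m-1
theorem sorted_indices_spec (rs : List Int) (m : Nat) :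
    (PySem.List.sorted (PySem.List.pyRange 0 (m : Int))
        (fun i => PySem.List.pyGetD rs i 0) true).Pairwise
      (fun a b => pvPrec rs a b = true) := by
  rw [PySem.List.sorted_rev_eq_foldl_insertBy]
  suffices hgen : ∀ k : Nat,
      (List.foldl (fun acc x => PySem.List.insertBy
          (fun a b => decide (PySem.List.pyGetD rs b 0 < PySem.List.pyGetD rs a 0)) x acc) []
        (PySem.List.pyRange 0 (k : Int))).Pairwise (fun a b => pvPrec rs a b = true) ∧
      (∀ y ∈ (List.foldl (fun acc x => PySem.List.insertBy
          (fun a b => decide (PySem.List.pyGetD rs b 0 < PySem.List.pyGetD rs a 0)) x acc) []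
        (PySem.List.pyRange 0 (k : Int))), 0 ≤ y ∧ y < (k : Int)) by
    exact (hgen m).1
  intro k
  induction k with
  | zero => simp [PySem.List.pyRange_zero_nat]
  | succ k ih =>
    have hsplit : PySem.List.pyRange 0 ((k + 1 : Nat) : Int) =
        PySem.List.pyRange 0 (k : Int) ++ [(k : Int)] := by
      have := PySem.List.pyRange_one_succ_right (a := 0) (b := (k : Int)) (by positivity)
      push_cast
      simpa using this
    rw [hsplit, List.foldl_append]
    rcases ih with ⟨hpw, hmem⟩
    constructor
    · refine insertBy_pairwise _ (fun a b => pvPrec rs a b = true) _ _ hpw ?_ ?_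
      · intro y hy
        by_cases hlt : PySem.List.pyGetD rs y 0 < PySem.List.pyGetD rs (k : Int) 0
        · exact Or.inl ⟨by simpa using hlt, (pvPrec_iff rs _ _).mpr (Or.inl hlt)⟩
        · refine Or.inr ⟨by simpa using hlt, (pvPrec_iff rs _ _).mpr ?_⟩
          rcases lt_or_eq_of_le (not_lt.mp hlt) with h' | h'
          · exact Or.inl h'
          · exact Or.inr ⟨h'.symm, (hmem y hy).2⟩
      · intro y z hR hb
        rw [pvPrec_iff] at hR
        simp only [decide_eq_true_eq] at hb ⊢
        rcases hR with h' | ⟨h', _⟩ <;> omega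
    · intro y hy
      rcases (PySem.List.mem_insertBy _ _ y _).mp hy with rfl | hy'
      · push_cast; omega
      · have := hmem y hy'
        push_cast; omega

-- in a pvPrec-sorted list, the number of elements preceding L[p] is exactly p
theorem countP_pairwise_getElem {α : Type} (q : α → α → Bool)
    (hasymm : ∀ a b, q a b = true → ¬ q b a = true) (hirr : ∀ a, ¬ q a a = true)
    (L : List α) (hL : L.Pairwise (fun a b => q a b = true)) (p : Nat) (hp : p < L.length) :
    L.countP (fun y => q y L[p]) = p := by
  induction L generalizing p with
  | nil => simp at hp
  | cons x t ih =>
    rcases List.pairwise_cons.mp hL with ⟨hx, ht⟩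
    cases p with
    | zero =>
      simp only [List.getElem_cons_zero]
      rw [List.countP_eq_zero]
      intro a ha
      rcases List.mem_cons.mp ha with rfl | ha'
      · exact hirr a
      · exact hasymm x a (hx a ha')
    | succ p =>
      have hp' : p < t.length := by simpa using hp
      have hmemt : t[p] ∈ t := List.getElem_mem hp'
      have hih := ih ht p hp'
      simp only [List.getElem_cons_succ, List.countP_cons]
      rw [if_pos (hx t[p] hmemt)]
      exact congrArg (· + 1) hih

-- membership in the first m elements of a pvPrec-sorted permutation of the indices
-- is exactly "fewer than m indices precede it"
theorem mem_take_iff_countP_lt {α : Type} (q : α → α → Bool)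
    (hasymm : ∀ a b, q a b = true → ¬ q b a = true) (hirr : ∀ a, ¬ q a a = true)
    (L : List α) (hL : L.Pairwise (fun a b => q a b = true)) (hnd : L.Nodup)
    (x : α) (hx : x ∈ L) (m : Nat) :
    (x ∈ L.take m ↔ L.countP (fun y => q y x) < m) := by
  obtain ⟨p, hp, rfl⟩ := List.getElem_of_mem hx
  rw [countP_pairwise_getElem q hasymm hirr L hL p hp]
  constructor
  · intro hmem
    obtain ⟨q, hq, hqe⟩ := List.getElem_of_mem hmem
    have hq' : q < L.length := lt_of_lt_of_le hq (by simpa using List.length_take_le m L)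
    have hqlen : q < m := by
      have := hq; simpa [List.length_take] using lt_of_lt_of_le this (by simp [List.length_take])
    have : L[q] = L[p] := by
      rw [← hqe]; exact (List.getElem_take).symm
    have := (hnd.getElem_inj_iff).mp this
    omega
  · intro hpm
    have : L.take m ⊆ L := List.take_subset m L
    have hplen : p < (L.take m).length := by simp [List.length_take]; omega
    have : (L.take m)[p] = L[p] := List.getElem_take
    rw [← this]
    exact List.getElem_mem hplen

-- term-by-term floor/mod decomposition of the proportional sizes
theorem sum_floordiv_decomp (total T : Int) (rs : List Int) :
    T * (rs.map (fun r => PySem.Int.floordiv (total * r) T)).sum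
      + (rs.map (fun r => PySem.Int.mod (total * r) T)).sum = total * rs.sum := by
  induction rs with
  | nil => simp
  | cons r rs ih =>
    simp only [List.map_cons, List.sum_cons, mul_add]
    have hd := PySem.Int.floordiv_mul_add_mod (total * r) T
    ring_nf
    ring_nf at ih
    nlinarith [hd]

-- 0 ≤ rem < len rs for the leftover rem = total - sum(sizes)
theorem rem_bounds (total T : Int) (rs : List Int) (hT : rs.sum = T) (hT0 : T ≠ 0)
    (hne : rs ≠ []) :
    0 ≤ total - (rs.map (fun r => PySem.Int.floordiv (total * r) T)).sum ∧
    total - (rs.map (fun r => PySem.Int.floordiv (total * r) T)).sum < (rs.length : Int) := by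
  set S := (rs.map (fun r => PySem.Int.floordiv (total * r) T)).sum with hS
  set M := (rs.map (fun r => PySem.Int.mod (total * r) T)).sum with hM
  have hdec : T * S + M = total * T := by
    rw [hS, hM, sum_floordiv_decomp, hT]
  have hrem : (total - S) * T = M := by nlinarith [hdec]
  have hn1 : 1 ≤ (rs.length : Int) := by
    have : 0 < rs.length := List.length_pos_iff.mpr hne
    exact_mod_cast this
  rcases lt_or_gt_of_ne hT0 with hneg | hpos
  · -- T < 0 : each mod ∈ [T+1, 0]
    have hb : (rs.length : Int) * (T + 1) ≤ M ∧ M ≤ 0 := by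
      rw [hM]; clear hrem hdec hM hS hn1 hne hT
      induction rs with
      | nil => simp
      | cons r rs ih =>
        simp only [List.map_cons, List.sum_cons, List.length_cons]
        have := PySem.Int.mod_neg_bounds (total * r) hneg
        push_cast
        constructor <;> nlinarith [ih.1, ih.2]
    constructor
    · nlinarith [hb.2]
    · nlinarith [hb.1]
  · -- T > 0 : each mod ∈ [0, T-1]
    have hb : 0 ≤ M ∧ M ≤ (rs.length : Int) * (T - 1) := by
      rw [hM]; clear hrem hdec hM hS hn1 hne hT
      induction rs with
      | nil => simp
      | cons r rs ih =>
        simp only [List.map_cons, List.sum_cons, List.length_cons]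
        have h1 := PySem.Int.mod_nonneg (total * r) hpos
        have h2 := PySem.Int.mod_lt (total * r) hpos
        push_cast
        constructor <;> nlinarith [ih.1, ih.2]
    constructor
    · nlinarith [hb.1]
    · nlinarith [hb.2]

-- the increment loop over a nodup list of in-range indices, position by position
theorem foldl_inc_getElem (S : List Int) (sizes : List Int) (hnd : S.Nodup)
    (hrange : ∀ s ∈ S, 0 ≤ s ∧ s < (sizes.length : Int)) (k : Nat) (hk : k < sizes.length) :
    ∃ h' : k < (S.foldl (fun acc idx =>
        PySem.List.pySetD acc idx (PySem.List.pyGetD acc idx 0 + 1)) sizes).length,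
      (S.foldl (fun acc idx =>
        PySem.List.pySetD acc idx (PySem.List.pyGetD acc idx 0 + 1)) sizes)[k]'h' =
      sizes[k] + (if (k : Int) ∈ S then 1 else 0) := by
  induction S generalizing sizes with
  | nil => exact ⟨hk, by simp⟩
  | cons s S ih =>
    rcases List.nodup_cons.mp hnd with ⟨hs, hnd'⟩
    rcases hrange s List.mem_cons_self with ⟨hs0, hslen⟩
    simp only [List.foldl_cons]
    set sizes' := PySem.List.pySetD sizes s (PySem.List.pyGetD sizes s 0 + 1) with hsz
    have hlen' : sizes'.length = sizes.length := PySem.List.length_pySetD _ _ _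
    have hrange' : ∀ t ∈ S, 0 ≤ t ∧ t < (sizes'.length : Int) := by
      intro t ht; rw [hlen']; exact hrange t (List.mem_cons_of_mem _ ht)
    obtain ⟨h', heq⟩ := ih sizes' hnd' hrange' (hlen' ▸ hk)
    refine ⟨h', ?_⟩
    rw [heq]
    have hset : sizes' = sizes.set s.toNat (PySem.List.pyGetD sizes s 0 + 1) := by
      rw [hsz, PySem.List.pySetD_of_nonneg _ _ hs0]
    have hv : sizes'[k]'(hlen' ▸ hk) =
        if s.toNat = k then PySem.List.pyGetD sizes s 0 + 1 else sizes[k] := by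
      simp only [hset]
      exact List.getElem_set _
    rw [hv]
    by_cases hkn : s.toNat = k
    · subst hkn
      have hks : ((s.toNat : Nat) : Int) = s := by omega
      have hget : PySem.List.pyGetD sizes s 0 = sizes[s.toNat] :=
        PySem.List.pyGetD_eq_getElem sizes 0 hs0 hslen
      have hm1 : ((s.toNat : Nat) : Int) ∈ s :: S := by rw [hks]; exact List.mem_cons_self
      have hm2 : ((s.toNat : Nat) : Int) ∉ S := by rw [hks]; exact hs
      rw [if_pos rfl, hget, if_neg hm2, if_pos hm1]
      omega
    · have hks : ¬ ((k : Int) = s) := by omega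
      have hm : ((k : Int) ∈ s :: S) ↔ ((k : Int) ∈ S) := by
        simp [List.mem_cons, hks]
      rw [if_neg hkn]
      by_cases h2 : (k : Int) ∈ S
      · rw [if_pos h2, if_pos (hm.mpr h2)]
      · rw [if_neg h2, if_neg (fun hh => h2 (hm.mp hh))]

-- length of the increment loop's result
theorem foldl_inc_length (S : List Int) (sizes : List Int) :
    (S.foldl (fun acc idx =>
      PySem.List.pySetD acc idx (PySem.List.pyGetD acc idx 0 + 1)) sizes).length =
    sizes.length := by
  induction S generalizing sizes with
  | nil => rfl
  | cons s S ih => simp only [List.foldl_cons]; rw [ih, PySem.List.length_pySetD]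

-- the equal-split branch: range comprehension (A) = replication (B), for parts ≠ 0
theorem equal_branch_eq (total parts : Int) (hp : parts ≠ 0) :
    distribute_equal_py total parts =
      List.replicate (total - PySem.Int.floordiv total parts * parts).toNat
          (PySem.Int.floordiv total parts + 1) ++
        List.replicate (parts - (total - PySem.Int.floordiv total parts * parts)).toNat
          (PySem.Int.floordiv total parts) := by
  have hr : total - PySem.Int.floordiv total parts * parts = PySem.Int.mod total parts := by
    have := PySem.Int.floordiv_mul_add_mod total parts
    omega
  rw [hr]
  unfold distribute_equal_py
  rcases lt_or_gt_of_ne hp with hneg | hpos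
  · have hb := PySem.Int.mod_neg_bounds total hneg
    rw [PySem.List.pyRange_one_eq_nil (by omega)]
    have h1 : (PySem.Int.mod total parts).toNat = 0 := by omega
    have h2 : (parts - PySem.Int.mod total parts).toNat = 0 := by omega
    simp [h1, h2]
  · have h0 := PySem.Int.mod_nonneg total hpos
    have hlt := PySem.Int.mod_lt total hpos
    set q := PySem.Int.floordiv total parts
    set r := PySem.Int.mod total parts
    apply List.ext_getElem
    · simp [PySem.List.pyRange_one, PySem.List.length_pyRange_one]; omega
    · intro k h1 h2
      simp only [PySem.List.pyRange_one]
      have hk : k < (parts - 0).toNat := by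
        simpa [PySem.List.length_pyRange_one] using h1
      simp only [List.getElem_map, List.getElem_range]
      by_cases hkr : k < r.toNat
      · rw [List.getElem_append_left (by simpa using hkr)]
        rw [List.getElem_replicate]
        split_ifs with h3 <;> omega
      · rw [List.getElem_append_right (by simpa using hkr)]
        rw [List.getElem_replicate]
        split_ifs with h3 <;> omega

-- definitional reduction of port A at a `some` argument (lets inlined; holds by rfl)
theorem dp_some (total parts : Int) (rs : List Int) :
    distribute_proportional_py total parts (some rs) =
      (if rs = [] ∨ PySem.List.len rs ≠ parts then distribute_equal_py total parts
       else if rs.sum = 0 then distribute_equal_py total parts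
       else
         (PySem.List.pyRange 0
             (total - (rs.map (fun r => PySem.Int.floordiv (total * r) rs.sum)).sum)).foldl
           (fun acc i =>
             PySem.List.pySetD acc
               (PySem.List.pyGetD
                 (PySem.List.sorted (PySem.List.pyRange 0 parts)
                   (fun i => PySem.List.pyGetD rs i 0) true) (PySem.Int.mod i parts) 0)
               (PySem.List.pyGetD acc
                 (PySem.List.pyGetD
                   (PySem.List.sorted (PySem.List.pyRange 0 parts)
                     (fun i => PySem.List.pyGetD rs i 0) true) (PySem.Int.mod i parts) 0) 0 + 1))
           (rs.map (fun r => PySem.Int.floordiv (total * r) rs.sum))) := rfl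

-- B's rank loop is a countP over the index range
theorem rank_eq_countP (rs : List Int) (i x : Int) (hix : PySem.List.pyGetD rs i 0 = x) :
    ((PySem.List.pyRange 0 (rs.length : Int)).map (fun j => (j, PySem.List.pyGetD rs j 0))).foldl
      (fun acc q => if q.2 > x ∨ (q.2 = x ∧ q.1 < i) then acc + 1 else acc) (0 : Int) =
    ((PySem.List.pyRange 0 (rs.length : Int)).countP (fun j => pvPrec rs j i) : Int) := by
  rw [List.foldl_map]
  subst hix
  have hcong : ∀ (acc : Int), ∀ j ∈ PySem.List.pyRange 0 (rs.length : Int),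
      (fun acc j =>
        if PySem.List.pyGetD rs j 0 > PySem.List.pyGetD rs i 0 ∨
            (PySem.List.pyGetD rs j 0 = PySem.List.pyGetD rs i 0 ∧ j < i)
        then acc + 1 else acc) acc j =
      (fun acc j => if pvPrec rs j i = true then acc + 1 else acc) acc j := by
    intro acc j _
    simp only [pvPrec_iff, gt_iff_lt]
  rw [PySem.List.foldl_congr_mem _ _ _ _ hcong]
  rw [PySem.List.foldl_count_if]
  simp

-- main equivalence on the proportional branch
theorem ratio_branch_eq (total : Int) (rs : List Int) (hne : rs ≠ []) (hT0 : rs.sum ≠ 0) :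
    distribute_proportional_py total (rs.length : Int) (some rs) =
    distribute_proportional_py_alt total (rs.length : Int) (some rs) := by
  have hlen : PySem.List.len rs = (rs.length : Int) := PySem.List.len_eq rs
  simp only [distribute_proportional_py, distribute_proportional_py_alt, Option.getD_some, hlen]
  rw [if_neg (by simp [hne, hT0]), if_neg (by simp [hT0]), if_neg (by simp [hne, hT0])]
  set T := rs.sum with hT
  set sizes := rs.map (fun r => PySem.Int.floordiv (total * r) T) with hsizes
  set rem := total - sizes.sum with hrem
  have hslen : sizes.length = rs.length := by rw [hsizes]; simp
  have hbounds := rem_bounds total T rs rfl hT0 hne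
  have hrem0 : 0 ≤ rem := hbounds.1
  have hremlt : rem < (rs.length : Int) := hbounds.2
  set L := PySem.List.sorted (PySem.List.pyRange 0 (rs.length : Int))
    (fun i => PySem.List.pyGetD rs i 0) true with hL
  have hperm : L.Perm (PySem.List.pyRange 0 (rs.length : Int)) :=
    PySem.List.sorted_perm _ _ _
  have hpw : L.Pairwise (fun a b => pvPrec rs a b = true) := sorted_indices_spec rs rs.length
  have hnd : L.Nodup := hperm.nodup_iff.mpr (PySem.List.nodup_pyRange_one 0 _)
  have hLlen : L.length = rs.length := by
    rw [hperm.length_eq, PySem.List.length_pyRange_one]; omega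
  have hmemL : ∀ y ∈ L, 0 ≤ y ∧ y < (rs.length : Int) := by
    intro y hy
    have := (PySem.List.mem_pyRange_one).mp (hperm.mem_iff.mp hy)
    omega
  -- A's loop: indices i ∈ [0, rem) satisfy i % parts = i, then fold over L.take rem
  have hmod : ∀ (acc : List Int), ∀ j ∈ PySem.List.pyRange 0 rem,
      (fun acc i =>
        let idx := PySem.List.pyGetD L (PySem.Int.mod i (rs.length : Int)) 0
        PySem.List.pySetD acc idx (PySem.List.pyGetD acc idx 0 + 1)) acc j =
      (fun acc j =>
        (fun acc idx => PySem.List.pySetD acc idx (PySem.List.pyGetD acc idx 0 + 1)) acc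
          (PySem.List.pyGetD (L.take rem.toNat) j 0)) acc j := by
    intro acc j hj
    have hi' := (PySem.List.mem_pyRange_one).mp hj
    have hn0 : (0 : Int) < (rs.length : Int) := by omega
    have hmm : PySem.Int.mod j (rs.length : Int) = j := by
      rw [PySem.Int.mod_eq_emod_of_pos hn0]
      exact Int.emod_eq_of_lt hi'.1 (by omega)
    have hitake : PySem.List.pyGetD L j 0 = PySem.List.pyGetD (L.take rem.toNat) j 0 := by
      have h1 : j < (L.length : Int) := by omega
      have h2 : j < ((L.take rem.toNat).length : Int) := by
        simp [List.length_take]; omega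
      rw [PySem.List.pyGetD_eq_getElem L 0 hi'.1 h1,
        PySem.List.pyGetD_eq_getElem (L.take rem.toNat) 0 hi'.1 h2]
      exact (List.getElem_take).symm
    simp only [hmm, hitake]
  rw [PySem.List.foldl_congr_mem _ _ _ _ hmod]
  have htlen : PySem.List.len (L.take rem.toNat) = rem := by
    rw [PySem.List.len_eq]; simp [List.length_take]; omega
  have hAfold := PySem.List.foldl_pyRange_pyGetD (L.take rem.toNat) 0
    (fun acc idx => PySem.List.pySetD acc idx (PySem.List.pyGetD acc idx 0 + 1))
    sizes (le_refl 0)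
  rw [htlen] at hAfold
  rw [hAfold]
  simp only [Int.toNat_zero, List.drop_zero]
  -- B's loop: append-map over the enumerate
  simp only [PySem.List.enumerate_eq_map_pyRange rs 0, PySem.List.len_eq]
  rw [List.foldl_map]
  have hBmap : ∀ (out : List Int), ∀ j ∈ PySem.List.pyRange 0 (rs.length : Int),
      (fun (out : List Int) (p : Int × Int) =>
        let rank := ((PySem.List.pyRange 0 (rs.length : Int)).map
            (fun j => (j, PySem.List.pyGetD rs j 0))).foldl
          (fun acc q => if q.2 > p.2 ∨ (q.2 = p.2 ∧ q.1 < p.1) then acc + 1 else acc) (0 : Int)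
        out ++ [PySem.List.pyGetD sizes p.1 0 + (if rank < rem then (1 : Int) else 0)])
        out ((fun j => (j, PySem.List.pyGetD rs j 0)) j) =
      out ++ [PySem.List.pyGetD sizes j 0 +
        (if ((PySem.List.pyRange 0 (rs.length : Int)).countP
            (fun j' => pvPrec rs j' j) : Int) < rem then (1 : Int) else 0)] := by
    intro out j _
    simp only
    rw [rank_eq_countP rs j (PySem.List.pyGetD rs j 0) rfl]
  rw [PySem.List.foldl_congr_mem _ _ _ _ hBmap]
  rw [PySem.List.foldl_append_singleton_eq_map]
  rw [List.nil_append]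
  -- now compare element-wise
  have hAlen := foldl_inc_length (L.take rem.toNat) sizes
  apply List.ext_getElem
  · rw [hAlen, hslen]
    simp [PySem.List.len_eq, PySem.List.length_pyRange_one]
  · intro k hk1 hk2
    have hkn : k < rs.length := by rw [hAlen, hslen] at hk1; exact hk1
    have hksz : k < sizes.length := by omega
    have htnd : (L.take rem.toNat).Nodup := hnd.sublist (List.take_sublist _ _)
    have htrange : ∀ s ∈ L.take rem.toNat, 0 ≤ s ∧ s < (sizes.length : Int) := by
      intro s hs
      have := hmemL s (List.mem_of_mem_take hs)
      constructor
      · exact this.1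
      · rw [hslen]; exact this.2
    obtain ⟨h', heq⟩ := foldl_inc_getElem (L.take rem.toNat) sizes htnd htrange k hksz
    rw [heq]
    have hkrange : ((k : Int)) ∈ PySem.List.pyRange 0 (rs.length : Int) := by
      rw [PySem.List.mem_pyRange_one]; constructor <;> [positivity; exact_mod_cast hkn]
    have hkL : ((k : Int)) ∈ L := hperm.mem_iff.mpr hkrange
    have hmemtake := mem_take_iff_countP_lt (pvPrec rs) (fun a b => pvPrec_asymm rs a b)
      (pvPrec_irrefl rs) L hpw hnd ((k : Int)) hkL rem.toNat
    have hcount : L.countP (fun y => pvPrec rs y (k : Int)) =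
        (PySem.List.pyRange 0 (rs.length : Int)).countP
          (fun j' => pvPrec rs j' (k : Int)) :=
      hperm.countP_eq _
    -- rhs element
    have hrhs : (((PySem.List.pyRange 0 (rs.length : Int)).map
        (fun j => PySem.List.pyGetD sizes j 0 +
          (if ((PySem.List.pyRange 0 (rs.length : Int)).countP
              (fun j' => pvPrec rs j' j) : Int) < rem then (1 : Int) else 0)))[k]'hk2) =
        PySem.List.pyGetD sizes (k : Int) 0 +
          (if ((PySem.List.pyRange 0 (rs.length : Int)).countP
              (fun j' => pvPrec rs j' (k : Int)) : Int) < rem then (1 : Int) else 0) := by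
      rw [List.getElem_map]
      congr 1 <;> rw [PySem.List.getElem_pyRange_one] <;> norm_num
    rw [hrhs]
    have hgd : PySem.List.pyGetD sizes (k : Int) 0 = sizes[k] := by
      rw [PySem.List.pyGetD_eq_getElem sizes 0 (by positivity) (by exact_mod_cast hksz)]
      simp
    rw [hgd]
    congr 1
    by_cases hmem : ((k : Int)) ∈ L.take rem.toNat
    · have hc := hmemtake.mp hmem
      rw [hcount] at hc
      have : ((PySem.List.pyRange 0 (rs.length : Int)).countP
          (fun j' => pvPrec rs j' (k : Int)) : Int) < rem := by
        have : ((PySem.List.pyRange 0 (rs.length : Int)).countP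
            (fun j' => pvPrec rs j' (k : Int))) < rem.toNat := hc
        omega
      simp [hmem, this]
    · have hc := fun h => hmem (hmemtake.mpr h)
      have hge : ¬ (((PySem.List.pyRange 0 (rs.length : Int)).countP
          (fun j' => pvPrec rs j' (k : Int)) : Int) < rem) := by
        intro hlt
        apply hc
        rw [← hcount] at hlt
        omega
      simp [hmem, hge]

-- ===== VERDICT (by name: the statement is the Claim_ definition above) =====
theorem distribute_proportional_py_spec : Claim_equal_distribute_proportional_py := by
  intro total parts ratios _ hpre
  unfold Spec_distribute_proportional_py
  have hequal : ∀ (h : (ratios.getD [] = [] ∨ PySem.List.len (ratios.getD []) ≠ parts ∨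
      (ratios.getD []).sum = 0)),
      distribute_proportional_py_alt total parts ratios =
        List.replicate (total - PySem.Int.floordiv total parts * parts).toNat
            (PySem.Int.floordiv total parts + 1) ++
          List.replicate (parts - (total - PySem.Int.floordiv total parts * parts)).toNat
            (PySem.Int.floordiv total parts) := by
    intro h
    unfold distribute_proportional_py_alt
    rw [if_pos h]
  match hr : ratios with
  | none =>
    rw [hequal (by simp), ← equal_branch_eq total parts hpre]
    rfl
  | some rs =>
    by_cases h1 : rs = [] ∨ PySem.List.len rs ≠ parts
    · have hA : distribute_proportional_py total parts (some rs) =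
          distribute_equal_py total parts := by
        rw [dp_some, if_pos h1]
      rw [hA, hequal (by simpa using Or.imp_right Or.inl h1), equal_branch_eq total parts hpre]
    · push_neg at h1
      rcases h1 with ⟨hne, hlen⟩
      by_cases h2 : rs.sum = 0
      · have hA : distribute_proportional_py total parts (some rs) =
            distribute_equal_py total parts := by
          rw [dp_some, if_neg (not_or.mpr ⟨hne, fun h => h hlen⟩), if_pos h2]
        rw [hA, hequal (by simp [h2]), equal_branch_eq total parts hpre]
      · have hparts : parts = (rs.length : Int) := by
          rw [← hlen, PySem.List.len_eq]
        rw [hparts]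
        exact ratio_branch_eq total rs hne h2
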